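-- pv_equiv track=rewrite | github.com/ArmaniKE/Wev-Dev | lab7/Task1/codingbat/w2/5.py | last2
-- ===== SOURCE A (Python) =====
-- def last2(str):
--   if len(str) < 2:
--     return 0
--
--   lst = str[len(str)-2:]
--   cnt = 0
--
--   for i in range(len(str)-2):
--     sub = str[i:i+2]
--     if sub == lst:
--       cnt = cnt + 1
--
--   return cnt
-- ===== SOURCE B (Python) =====
-- def last2(str):
--   if len(str) < 2:
--     return 0
--   lst = str[len(str)-2:]
--   cnt = 0
--   pos = str.find(lst)
--   while pos != -1 and pos < len(str) - 2:
--     cnt = cnt + 1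
--     pos = str.find(lst, pos + 1)
--   return cnt
-- ===== Notes on version B (the rewrite author's own statement) =====
-- stated objective: faster
-- what changed: B replaces A's scan over every index (building a fresh 2-char slice at each position and comparing it to the tail pair) with a find-driven search loop: it jumps from match to match via str.find(lst, pos+1), counting matches until find fails or a match lands at/after len-2, so the trailing occurrence itself is never counted; the C-level substring search skips non-matching positions without Python-level slicing.
import Mathlib
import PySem

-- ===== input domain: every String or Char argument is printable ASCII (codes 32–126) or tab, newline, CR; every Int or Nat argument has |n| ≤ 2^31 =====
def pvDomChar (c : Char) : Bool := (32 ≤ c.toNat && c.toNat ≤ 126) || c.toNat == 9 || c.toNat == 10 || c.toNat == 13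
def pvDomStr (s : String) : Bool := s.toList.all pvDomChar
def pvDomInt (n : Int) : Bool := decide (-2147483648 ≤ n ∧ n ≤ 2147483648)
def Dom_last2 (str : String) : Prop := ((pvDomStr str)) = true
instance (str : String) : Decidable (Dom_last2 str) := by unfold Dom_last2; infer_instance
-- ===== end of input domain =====

-- B replaces A's per-index slice-and-compare scan with a str.find-driven loop that jumps
-- from match to match, counting matches strictly before position len-2 (faster constant factor).

-- ===== PORT A =====
def last2 (str : String) : Int :=
  if PySem.Str.len str < 2 then 0
  else
    let lst := PySem.Str.slice str (some (PySem.Str.len str - 2)) none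
    let cnt : Int := 0
    (PySem.List.pyRange 0 (PySem.Str.len str - 2)).foldl
      (fun cnt i =>
        let sub := PySem.Str.slice str (some i) (some (i + 2))
        if sub == lst then cnt + 1 else cnt) cnt

-- ===== PORT B =====
-- the while loop, as fuel recursion (the fuel bounds the number of iterations; each find
-- strictly advances pos, so str-length fuel is always enough)
def last2AltGo (s lst : String) : Nat → Int → Int → Int
  | 0, _, cnt => cnt
  | fuel+1, pos, cnt =>
    if pos ≠ -1 ∧ pos < PySem.Str.len s - 2 then
      last2AltGo s lst fuel (PySem.Str.findFrom s lst (pos + 1) none) (cnt + 1)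
    else cnt

def last2_alt (str : String) : Int :=
  if PySem.Str.len str < 2 then 0
  else
    let lst := PySem.Str.slice str (some (PySem.Str.len str - 2)) none
    last2AltGo str lst (PySem.Str.len str).toNat (PySem.Str.find str lst) 0

-- ===== PRECONDITION & SPEC =====
def Spec_last2 (str : String) (out : Int) : Prop := out = last2_alt str
instance (str : String) (out : Int) : Decidable (Spec_last2 str out) := by unfold Spec_last2; infer_instance

-- ===== CLAIM (what is proved, stated in full; the proofs are below) =====
def Claim_equal_last2 : Prop := ∀ (str : String), Dom_last2 str → Spec_last2 str (last2 str)

-- ===== LEMMAS AND PROOFS =====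

-- a prefix of a later drop is an infix of an earlier drop
lemma prefix_drop_infix (cs L : List Char) (k j : Nat) (hkj : k ≤ j)
    (h : L <+: cs.drop j) : L <:+: cs.drop k := by
  have hd : (cs.drop k).drop (j - k) = cs.drop j := by
    rw [List.drop_drop]; congr 1; omega
  exact h.isInfix.trans (hd ▸ (List.drop_suffix (j - k) (cs.drop k)).isInfix)

-- the find-loop counts the matches in [k, n-2)
lemma go_spec (s lst : String) :
    ∀ (fuel k : Nat) (cnt : Int), k ≤ s.toList.length → s.toList.length - k ≤ fuel →
    last2AltGo s lst fuel (PySem.Str.findFrom s lst (k : Int) none) cnt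
      = cnt + ((List.range' k (s.toList.length - 2 - k)).countP
          (fun j => decide (lst.toList <+: s.toList.drop j)) : Int) := by
  intro fuel
  induction fuel with
  | zero =>
    intro k cnt hk hf
    have hz : s.toList.length - 2 - k = 0 := by omega
    rw [hz, last2AltGo]
    simp
  | succ fuel ih =>
    intro k cnt hk hf
    set n := s.toList.length with hn
    by_cases hp : PySem.Str.findFrom s lst (k : Int) none = -1
    · have hninf : ¬ lst.toList <:+: s.toList.drop k := by
        have := (PySem.Chars.findFrom_natCast_eq_neg_one_iff s.toList lst.toList k hk)
        simp at hp
        exact this.mp hp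
      have hcz : (List.range' k (n - 2 - k)).countP
          (fun j => decide (lst.toList <+: s.toList.drop j)) = 0 := by
        apply List.countP_eq_zero.mpr
        intro j hj
        have hj' := List.mem_range'_1.mp hj
        simp only [decide_eq_true_eq]
        intro hpre
        exact hninf (prefix_drop_infix _ _ _ _ hj'.1 hpre)
      have hcond : ¬ (PySem.Str.findFrom s lst (k : Int) none ≠ -1 ∧
          PySem.Str.findFrom s lst (k : Int) none < PySem.Str.len s - 2) := by
        intro hc; exact hc.1 hp
      rw [last2AltGo, if_neg hcond, hcz]
      simp
    · have hp' : PySem.Chars.findFrom s.toList lst.toList (k : Int) none ≠ -1 := by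
        simpa using hp
      obtain ⟨h1, h2, h3⟩ := PySem.Chars.findFrom_natCast_spec s.toList lst.toList k hk hp'
      set P := PySem.Chars.findFrom s.toList lst.toList (k : Int) none with hP
      have hP0 : 0 ≤ P := le_trans (by exact_mod_cast Int.natCast_nonneg k) h1
      set m := P.toNat with hm
      have hPm : (m : Int) = P := Int.toNat_of_nonneg hP0
      have hkm : k ≤ m := by omega
      have hPs : PySem.Str.findFrom s lst (k : Int) none = P := by simp [hP]
      by_cases hlt : P < (n : Int) - 2
      · -- continue: match at m, recurse from m+1
        have hmn : m < n - 2 := by omega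
        have hcond : PySem.Str.findFrom s lst (k : Int) none ≠ -1 ∧
            PySem.Str.findFrom s lst (k : Int) none < PySem.Str.len s - 2 := by
          rw [hPs]; exact ⟨by omega, by rw [PySem.Str.len_eq]; omega⟩
        have hstep : last2AltGo s lst (fuel + 1) (PySem.Str.findFrom s lst (k : Int) none) cnt
            = last2AltGo s lst fuel (PySem.Str.findFrom s lst (P + 1) none) (cnt + 1) := by
          rw [last2AltGo, if_pos hcond, hPs]
        have hcast : P + 1 = ((m + 1 : Nat) : Int) := by omega
        have hrec := ih (m + 1) (cnt + 1) (by omega) (by omega)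
        rw [hstep, hcast, hrec]
        -- now count over [k, n-2) = 1 + count over [m+1, n-2)
        have hsplit : (List.range' k (n - 2 - k)).countP
              (fun j => decide (lst.toList <+: s.toList.drop j))
            = 1 + (List.range' (m + 1) (n - 2 - (m + 1))).countP
              (fun j => decide (lst.toList <+: s.toList.drop j)) := by
          have hlen : n - 2 - k = (m - k) + (1 + (n - 2 - (m + 1))) := by omega
          rw [hlen, ← List.range'_append, List.countP_append]
          have hz : (List.range' k (m - k)).countP
              (fun j => decide (lst.toList <+: s.toList.drop j)) = 0 := by
            apply List.countP_eq_zero.mpr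
            intro j hj
            have hj' := List.mem_range'_1.mp hj
            simp only [decide_eq_true_eq]
            exact h3 j hj'.1 (by omega)
          have hkm' : k + 1 * (m - k) = m := by omega
          rw [hz, hkm']
          have hone : List.range' m (1 + (n - 2 - (m + 1))) = m :: List.range' (m + 1) (n - 2 - (m + 1)) := by
            rw [Nat.add_comm 1, List.range'_succ]
          rw [hone, List.countP_cons_of_pos (by simpa using h2)]
          omega
        rw [hsplit]
        push_cast
        ring
      · -- exit: first match at/after n-2, nothing counted in [k, n-2)
        have hcond : ¬ (PySem.Str.findFrom s lst (k : Int) none ≠ -1 ∧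
            PySem.Str.findFrom s lst (k : Int) none < PySem.Str.len s - 2) := by
          rw [hPs, PySem.Str.len_eq]
          intro hc
          exact hlt hc.2
        have hcz : (List.range' k (n - 2 - k)).countP
            (fun j => decide (lst.toList <+: s.toList.drop j)) = 0 := by
          apply List.countP_eq_zero.mpr
          intro j hj
          have hj' := List.mem_range'_1.mp hj
          simp only [decide_eq_true_eq]
          exact h3 j hj'.1 (by omega)
        rw [last2AltGo, if_neg hcond, hcz]
        simp

-- String equality tests agree with char-list equality tests
lemma string_beq_toList (x y : String) : (x == y) = (x.toList == y.toList) := by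
  by_cases h : x = y
  · simp [h]
  · have : x.toList ≠ y.toList := fun hc => h (String.toList_inj.mp hc)
    simp [h, this]

-- ===== VERDICT (by name: the statement is the Claim_ definition above) =====
theorem last2_spec : Claim_equal_last2 := by
  intro s _
  unfold Spec_last2 last2 last2_alt
  rw [PySem.Str.len_eq]
  by_cases h2 : ((s.toList.length : Int)) < 2
  · rw [if_pos h2, if_pos h2]
  · rw [if_neg h2, if_neg h2]
    have hn : 2 ≤ s.toList.length := by exact_mod_cast not_lt.mp h2
    have hcast : (s.toList.length : Int) - 2 = ((s.toList.length - 2 : Nat) : Int) := by omega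
    simp only [hcast]
    have hfind : PySem.Str.find s (PySem.Str.slice s (some ((s.toList.length - 2 : Nat) : Int)) none)
        = PySem.Str.findFrom s (PySem.Str.slice s (some ((s.toList.length - 2 : Nat) : Int)) none)
            ((0 : Nat) : Int) none := by simp
    rw [hfind, Int.toNat_natCast,
        go_spec s _ s.toList.length 0 0 (Nat.zero_le _) (by omega)]
    have hE : (PySem.Str.slice s (some ((s.toList.length - 2 : Nat) : Int)) none).toList
        = s.toList.drop (s.toList.length - 2) := by
      have hb : (PySem.Str.slice s (some ((s.toList.length - 2 : Nat) : Int)) none).toList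
          = PySem.List.slice s.toList (some ((s.toList.length - 2 : Nat) : Int)) none := by
        simp [PySem.Str.slice]
      rw [hb, PySem.List.slice_from_natCast]
    have hLlen : (PySem.Str.slice s (some ((s.toList.length - 2 : Nat) : Int)) none).toList.length = 2 := by
      rw [hE, List.length_drop]; omega
    simp only [PySem.List.pyRange_one, List.foldl_map, PySem.List.foldl_if_add_one,
               Nat.sub_zero, ← List.range_eq_range', zero_add]
    refine congrArg Nat.cast (List.countP_congr ?_)
    intro j hj
    have hjlt : j < s.toList.length - 2 := by simpa using List.mem_range.mp hj
    have e2 : ((j : Int) + 2) = (((j + 2 : Nat)) : Int) := by push_cast; ring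
    have hsub : (PySem.Str.slice s (some ((j : Int))) (some ((j : Int) + 2))).toList
        = (s.toList.drop j).take 2 := by
      rw [e2]
      have hb : (PySem.Str.slice s (some ((j : Int))) (some (((j + 2 : Nat)) : Int))).toList
          = PySem.List.slice s.toList (some ((j : Int))) (some (((j + 2 : Nat)) : Int)) := by
        simp [PySem.Str.slice]
      have ht : j + 2 - j = 2 := by omega
      rw [hb, PySem.List.slice_natCast, ht]
    simp only [string_beq_toList, hsub]
    have hiff : ((PySem.Str.slice s (some ((s.toList.length - 2 : Nat) : Int)) none).toList
          <+: s.toList.drop j)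
        ↔ (s.toList.drop j).take 2
            = (PySem.Str.slice s (some ((s.toList.length - 2 : Nat) : Int)) none).toList := by
      rw [List.prefix_iff_eq_take, hLlen]; exact eq_comm
    simpa using hiff.symm
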